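-- pv_equiv track=rewrite | github.com/AIOCodeBase/GFGPOTD | 05 November 2022/Python/Grouping Of Numbers.py | maxGroupSize
-- ===== SOURCE A (Python) =====
-- def maxGroupSize(arr, N, K):
--     # code here
--     ns = [0]*K
--     for e in arr:
--         ns[e%K] += 1
--
--     ans = ns[0] > 0
--
--     for i in range(1, K//2+1):
--
--         if i*2 == K:
--             ans += ns[i] > 0
--         else:
--             ans += max(ns[i], ns[K-i])
--     return ans
-- ===== SOURCE B (Python) =====
-- def maxGroupSize(arr, N, K):
--     rs = sorted(e % K for e in arr)
--     # run-length encode the sorted remainders into (value, count) groups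
--     groups = []
--     for r in rs:
--         if groups and groups[-1][0] == r:
--             groups[-1][1] += 1
--         else:
--             groups.append([r, 1])
--     total = 0
--     i = 0
--     j = len(groups) - 1
--     if groups and groups[0][0] == 0:
--         total = 1
--         i = 1
--     # two pointers over the group list: smallest vs largest remaining remainder
--     while i <= j:
--         r, cr = groups[i]
--         s, cs = groups[j]
--         if i == j:
--             total += 1 if r * 2 == K else cr
--             break
--         if r + s == K:
--             total += max(cr, cs)
--             i += 1
--             j -= 1
--         elif r + s < K:
--             total += cr
--             i += 1
--         else:
--             total += cs
--             j -= 1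
--     return total
-- ===== Notes on version B (the rewrite author's own statement) =====
-- stated objective: alternative
-- what changed: B replaces A's dense size-K bucket array and index loop over 1..K//2 by sorting the remainders, run-length-encoding them into (value,count) groups, and a two-pointer sweep over the group list matching the smallest against the largest remaining remainder (consuming a complementary pair when they sum to K).
-- outside the precondition, e.g. on maxGroupSize([1, 2], 2, 1): A returns True, B returns 1; on maxGroupSize([], 0, 0): A raises IndexError, B returns 0
import Mathlib
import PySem

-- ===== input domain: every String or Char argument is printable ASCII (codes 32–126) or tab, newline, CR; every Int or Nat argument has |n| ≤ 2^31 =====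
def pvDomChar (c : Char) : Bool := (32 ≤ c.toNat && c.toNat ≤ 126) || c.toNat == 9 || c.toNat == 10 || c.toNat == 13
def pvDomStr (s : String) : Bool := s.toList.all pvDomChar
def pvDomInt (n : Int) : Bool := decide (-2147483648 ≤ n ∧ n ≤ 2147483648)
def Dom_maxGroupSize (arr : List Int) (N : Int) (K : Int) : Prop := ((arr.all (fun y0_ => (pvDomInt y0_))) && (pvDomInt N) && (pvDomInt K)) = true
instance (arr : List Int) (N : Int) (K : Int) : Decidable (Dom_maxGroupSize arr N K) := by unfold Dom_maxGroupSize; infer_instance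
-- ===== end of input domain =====

-- B sorts the remainders, run-length-encodes them into (value,count) groups and sweeps the
-- group list with two pointers (smallest vs largest remaining remainder), instead of A's
-- dense size-K bucket array indexed over 1..K//2; equivalence for K ≥ 2 (return value only).

-- ===== PORT A =====
def maxGroupSize (arr : List Int) (N : Int) (K : Int) : Int :=
  -- ns = [0]*K; for e in arr: ns[e%K] += 1   (Python's dense list ported as Array; under
  -- Pre_ (K ≥ 2) every index used — e%K, 0, i, K-i — lies in [0,K) exactly as in Python)
  let ns : Array Int := arr.foldl (fun ns e =>
      ns.set! (PySem.Int.mod e K).toNat (ns[(PySem.Int.mod e K).toNat]! + 1))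
    (Array.replicate K.toNat 0)
  -- ans = ns[0] > 0  (bool, used as int)
  let ans : Int := if ns[(0:Nat)]! > 0 then 1 else 0
  -- for i in range(1, K//2+1): …
  (PySem.List.pyRange 1 (PySem.Int.floordiv K 2 + 1) 1).foldl
    (fun acc i =>
      if i * 2 == K then acc + (if ns[i.toNat]! > 0 then 1 else 0)
      else acc + max (ns[i.toNat]!) (ns[(K - i).toNat]!))
    ans

-- ===== PORT B =====
-- while i <= j: two-pointer sweep of Source B, one recursive step per loop iteration
-- (on all states the port reaches, the indices i, j are in range, so the getD default is never read)
def pvTwoPtr (gs : List (Int × Int)) (K : Int) (i j total : Int) : Int :=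
  if h : i ≤ j then
    -- r, cr = groups[i]; s, cs = groups[j]
    let p := (PySem.List.pyGet? gs i).getD (0, 0)
    let q := (PySem.List.pyGet? gs j).getD (0, 0)
    if hij : i = j then total + (if p.1 * 2 = K then 1 else p.2)
    else if p.1 + q.1 = K then pvTwoPtr gs K (i + 1) (j - 1) (total + max p.2 q.2)
    else if p.1 + q.1 < K then pvTwoPtr gs K (i + 1) j (total + p.2)
    else pvTwoPtr gs K i (j - 1) (total + q.2)
  else total
termination_by (j + 1 - i).toNat
decreasing_by all_goals omega

def maxGroupSize_alt (arr : List Int) (N : Int) (K : Int) : Int :=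
  -- rs = sorted(e % K for e in arr)
  let rs := PySem.List.sorted (arr.map (fun e => PySem.Int.mod e K)) (fun x => x) false
  -- run-length encode: for r in rs: if groups and groups[-1][0] == r: groups[-1][1] += 1 else: groups.append([r, 1])
  let groups := rs.foldl (fun gs r =>
      match gs.getLast? with
      | some (v, c) => if v == r then gs.dropLast ++ [(v, c + 1)] else gs ++ [(r, 1)]
      | none => [(r, 1)]) ([] : List (Int × Int))
  -- total = 0; i = 0; j = len(groups) - 1; if groups and groups[0][0] == 0: total = 1; i = 1
  let j : Int := (groups.length : Int) - 1
  match groups with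
  | (v, _) :: _ => if v = 0 then pvTwoPtr groups K 1 j 1 else pvTwoPtr groups K 0 j 0
  | [] => pvTwoPtr groups K 0 j 0

-- ===== PRECONDITION & SPEC =====
-- Pre_ excludes K ≤ 1: for K ≤ 0 A raises (ZeroDivisionError / IndexError), and for K = 1 A's
-- pair loop is empty, so A returns a Python bool (True/False) rather than an int.
def Pre_maxGroupSize (arr : List Int) (N : Int) (K : Int) : Prop := 2 ≤ K
instance (arr : List Int) (N : Int) (K : Int) : Decidable (Pre_maxGroupSize arr N K) := by unfold Pre_maxGroupSize; infer_instance
def pvWitness_maxGroupSize : List Int × Int × Int := ([3, 8, 5, 3, 0], 5, 5)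
def Spec_maxGroupSize (arr : List Int) (N : Int) (K : Int) (out : Int) : Prop := out = maxGroupSize_alt arr N K
instance (arr : List Int) (N : Int) (K : Int) (out : Int) : Decidable (Spec_maxGroupSize arr N K out) := by unfold Spec_maxGroupSize; infer_instance

-- ===== CLAIM (what is proved, stated in full; the proofs are below) =====
def Claim_equal_maxGroupSize : Prop := ∀ (arr : List Int) (N : Int) (K : Int), Dom_maxGroupSize arr N K → Pre_maxGroupSize arr N K → Spec_maxGroupSize arr N K (maxGroupSize arr N K)

-- ===== LEMMAS AND PROOFS =====

-- remainders of arr mod K, their multiplicities, the per-distinct-remainder contribution, A's per-index term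
def pvRems (arr : List Int) (K : Int) : List Int := arr.map (fun e => PySem.Int.mod e K)

def pvC (arr : List Int) (K : Int) (r : Int) : Int := ((pvRems arr K).count r : Int)

def pvG (arr : List Int) (K : Int) (r : Int) : Int :=
  if r ∈ pvRems arr K then
    (if r = 0 ∨ r * 2 = K then 1
     else if (K - r) ∉ pvRems arr K then pvC arr K r
     else if r < K - r then max (pvC arr K r) (pvC arr K (K - r)) else 0)
  else 0

def pvT (arr : List Int) (K : Int) (i : Int) : Int :=
  if i * 2 = K then (if 0 < pvC arr K i then 1 else 0)
  else max (pvC arr K i) (pvC arr K (K - i))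

lemma pv_mem_rems {arr : List Int} {K x : Int} (hK : 0 < K) (hx : x ∈ pvRems arr K) :
    0 ≤ x ∧ x < K := by
  rcases List.mem_map.1 hx with ⟨e, -, rfl⟩
  exact ⟨PySem.Int.mod_nonneg e hK, PySem.Int.mod_lt e hK⟩

lemma pv_dense (l : List Int) : ∀ (ns : Array Int),
    (∀ x ∈ l, 0 ≤ x ∧ x < (ns.size : Int)) →
    (l.foldl (fun a r => a.set! r.toNat (a[r.toNat]! + 1)) ns).size = ns.size ∧
    ∀ j : Int, 0 ≤ j → j < (ns.size : Int) →
      (l.foldl (fun a r => a.set! r.toNat (a[r.toNat]! + 1)) ns)[j.toNat]!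
        = ns[j.toNat]! + l.count j := by
  induction l with
  | nil => intro ns _; simp
  | cons r l ih =>
    intro ns hmem
    obtain ⟨hr0, hrK⟩ := hmem r (List.mem_cons_self ..)
    have hrlt : r.toNat < ns.size := by omega
    have hset : ns.set! r.toNat (ns[r.toNat]! + 1)
        = ns.setIfInBounds r.toNat (ns[r.toNat]! + 1) := Array.set!_eq_setIfInBounds ..
    have hlen : (ns.setIfInBounds r.toNat (ns[r.toNat]! + 1)).size = ns.size :=
      Array.size_setIfInBounds ..
    have ih' := ih (ns.setIfInBounds r.toNat (ns[r.toNat]! + 1))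
      (by intro x hx; rw [hlen]; exact hmem x (List.mem_cons_of_mem _ hx))
    refine ⟨?_, ?_⟩
    · simp only [List.foldl_cons, hset, ih'.1, hlen]
    · intro j hj0 hjK
      have hjlt : j.toNat < ns.size := by omega
      simp only [List.foldl_cons, hset]
      rw [ih'.2 j hj0 (by rw [hlen]; exact hjK)]
      rw [getElem!_pos (ns.setIfInBounds r.toNat (ns[r.toNat]! + 1)) j.toNat (by simpa using hjlt),
        getElem!_pos ns j.toNat hjlt, Array.getElem_setIfInBounds]
      by_cases h : r.toNat = j.toNat
      · have hrj : r = j := by omega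
        subst hrj
        rw [if_pos h, getElem!_pos ns r.toNat hrlt]
        simp
        omega
      · have hne : r ≠ j := by intro hc; subst hc; omega
        rw [if_neg h]
        simp [hne]
      · exact hjlt

lemma pv_A_sum (arr : List Int) (N K : Int) (hK : 2 ≤ K) :
    maxGroupSize arr N K
      = (if 0 < pvC arr K 0 then 1 else 0)
        + ((PySem.List.pyRange 1 (PySem.Int.floordiv K 2 + 1) 1).map (pvT arr K)).sum := by
  have hKpos : (0:Int) < K := by omega
  obtain ⟨hq1, hq2⟩ := (PySem.Int.floordiv_eq_iff_of_pos (a := K) (b := 2)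
      (q := PySem.Int.floordiv K 2) (by norm_num)).1 rfl
  unfold maxGroupSize
  have hfold : arr.foldl (fun ns e =>
        ns.set! (PySem.Int.mod e K).toNat (ns[(PySem.Int.mod e K).toNat]! + 1))
        (Array.replicate K.toNat (0:Int))
      = (pvRems arr K).foldl (fun a r => a.set! r.toNat (a[r.toNat]! + 1))
        (Array.replicate K.toNat (0:Int)) := by
    rw [pvRems, List.foldl_map]
  have hlen0 : (((Array.replicate K.toNat (0:Int)).size : Int)) = K := by simp; omega
  obtain ⟨hlenF, hgetF⟩ := pv_dense (pvRems arr K) (Array.replicate K.toNat (0:Int))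
    (by intro x hx; rw [hlen0]; exact pv_mem_rems hKpos hx)
  have hC : ∀ j : Int, 0 ≤ j → j < K →
      (arr.foldl (fun ns e =>
          ns.set! (PySem.Int.mod e K).toNat (ns[(PySem.Int.mod e K).toNat]! + 1))
        (Array.replicate K.toNat (0:Int)))[j.toNat]! = pvC arr K j := by
    intro j h0 h1
    rw [show (arr.foldl (fun ns e =>
          ns.set! (PySem.Int.mod e K).toNat (ns[(PySem.Int.mod e K).toNat]! + 1))
        (Array.replicate K.toNat (0:Int)))
      = ((pvRems arr K).foldl (fun a r => a.set! r.toNat (a[r.toNat]! + 1))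
        (Array.replicate K.toNat (0:Int))) from hfold]
    rw [hgetF j h0 (by rw [hlen0]; exact h1)]
    rw [getElem!_pos _ _ (by simp; omega)]
    simp [pvC]
  have hbody : (fun (acc i : Int) =>
      if i * 2 == K then acc + (if (arr.foldl (fun ns e =>
          ns.set! (PySem.Int.mod e K).toNat (ns[(PySem.Int.mod e K).toNat]! + 1))
        (Array.replicate K.toNat (0:Int)))[i.toNat]! > 0 then 1 else 0)
      else acc + max ((arr.foldl (fun ns e =>
          ns.set! (PySem.Int.mod e K).toNat (ns[(PySem.Int.mod e K).toNat]! + 1))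
        (Array.replicate K.toNat (0:Int)))[i.toNat]!)
        ((arr.foldl (fun ns e =>
          ns.set! (PySem.Int.mod e K).toNat (ns[(PySem.Int.mod e K).toNat]! + 1))
        (Array.replicate K.toNat (0:Int)))[(K - i).toNat]!))
      = fun (acc i : Int) => acc +
        (if i * 2 == K then (if (arr.foldl (fun ns e =>
          ns.set! (PySem.Int.mod e K).toNat (ns[(PySem.Int.mod e K).toNat]! + 1))
        (Array.replicate K.toNat (0:Int)))[i.toNat]! > 0 then 1 else 0)
        else max ((arr.foldl (fun ns e =>
          ns.set! (PySem.Int.mod e K).toNat (ns[(PySem.Int.mod e K).toNat]! + 1))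
        (Array.replicate K.toNat (0:Int)))[i.toNat]!)
        ((arr.foldl (fun ns e =>
          ns.set! (PySem.Int.mod e K).toNat (ns[(PySem.Int.mod e K).toNat]! + 1))
        (Array.replicate K.toNat (0:Int)))[(K - i).toNat]!)) := by
    funext acc i; split <;> rfl
  have hC0 : (arr.foldl (fun ns e =>
        ns.set! (PySem.Int.mod e K).toNat (ns[(PySem.Int.mod e K).toNat]! + 1))
      (Array.replicate K.toNat (0:Int)))[(0:Nat)]! = pvC arr K 0 := hC 0 le_rfl hKpos
  simp only [hbody, hC0, PySem.List.foldl_add]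
  congr 1
  apply congrArg
  apply List.map_congr_left
  intro i hi
  obtain ⟨hi1, hi2⟩ := PySem.List.mem_pyRange_one.1 hi
  have hiK : i < K := by omega
  have hKi0 : 0 ≤ K - i := by omega
  have hKiK : K - i < K := by omega
  rw [hC i (by omega) hiK, hC (K - i) hKi0 hKiK, pvT]
  simp only [beq_iff_eq]

lemma pv_pair_sum (K : Int) (g T : Int → Int) (hK : 2 ≤ K)
    (hmid : ∀ i, i * 2 = K → g i = T i)
    (hpair : ∀ i, 1 ≤ i → i * 2 < K → g i + g (K - i) = T i) :
    ∀ (m : Nat) (lo : Int), 1 ≤ lo → (K - 2 * lo + 1).toNat ≤ m →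
    ((PySem.List.pyRange lo (K - lo + 1) 1).map g).sum
      = ((PySem.List.pyRange lo (PySem.Int.floordiv K 2 + 1) 1).map T).sum := by
  obtain ⟨hq1, hq2⟩ := (PySem.Int.floordiv_eq_iff_of_pos (a := K) (b := 2)
      (q := PySem.Int.floordiv K 2) (by norm_num)).1 rfl
  intro m
  induction m with
  | zero =>
    intro lo hlo hm
    rw [PySem.List.pyRange_one_eq_nil (by omega), PySem.List.pyRange_one_eq_nil (by omega)]
    simp
  | succ m ih =>
    intro lo hlo hm
    by_cases hbig : PySem.Int.floordiv K 2 + 1 ≤ lo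
    · rw [PySem.List.pyRange_one_eq_nil (by omega), PySem.List.pyRange_one_eq_nil (by omega)]
      simp
    · by_cases hmidc : lo * 2 = K
      · have hqlo : PySem.Int.floordiv K 2 = lo := by omega
        have h1 : K - lo + 1 = lo + 1 := by omega
        rw [h1, hqlo]
        rw [show PySem.List.pyRange lo (lo + 1) 1 = [lo] from by
          rw [PySem.List.pyRange_one_cons (by omega), PySem.List.pyRange_one_eq_nil (by omega)]]
        simp [hmid lo hmidc]
      · have hlt : lo * 2 < K := by omega
        have hL1 : PySem.List.pyRange lo (K - lo + 1) 1
            = lo :: (PySem.List.pyRange (lo + 1) (K - lo) 1 ++ [K - lo]) := by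
          rw [PySem.List.pyRange_one_cons (by omega)]
          rw [show K - lo + 1 = (K - lo) + 1 from rfl]
          rw [PySem.List.pyRange_one_succ_right (by omega)]
        have hR1 : PySem.List.pyRange lo (PySem.Int.floordiv K 2 + 1) 1
            = lo :: PySem.List.pyRange (lo + 1) (PySem.Int.floordiv K 2 + 1) 1 :=
          PySem.List.pyRange_one_cons (by omega)
        have ihm := ih (lo + 1) (by omega) (by omega)
        rw [show K - (lo + 1) + 1 = K - lo from by ring] at ihm
        rw [hL1, hR1]
        simp only [List.map_cons, List.map_append, List.sum_cons, List.sum_append,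
          List.map_cons, List.sum_cons, List.map_nil, List.sum_nil]
        rw [← hpair lo (by omega) hlt]
        rw [← ihm]
        ring

lemma pv_count_nonneg (arr : List Int) (K r : Int) : 0 ≤ pvC arr K r := Int.natCast_nonneg _

lemma pv_count_pos (arr : List Int) {K r : Int} (h : r ∈ pvRems arr K) : 0 < pvC arr K r := by
  unfold pvC
  exact_mod_cast List.count_pos_iff.2 h

lemma pv_count_zero (arr : List Int) {K r : Int} (h : r ∉ pvRems arr K) : pvC arr K r = 0 := by
  unfold pvC
  exact_mod_cast List.count_eq_zero.2 h

lemma pv_mid (arr : List Int) (K : Int) (hK : 2 ≤ K) :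
    ∀ i, i * 2 = K → pvG arr K i = pvT arr K i := by
  intro i hi
  unfold pvG pvT
  rw [if_pos (show i * 2 = K from hi)]
  by_cases h : i ∈ pvRems arr K
  · rw [if_pos h, if_pos (Or.inr hi), if_pos (pv_count_pos arr h)]
  · rw [if_neg h, if_neg (by rw [pv_count_zero arr h]; omega)]

lemma pv_pair (arr : List Int) (K : Int) (hK : 2 ≤ K) :
    ∀ i, 1 ≤ i → i * 2 < K → pvG arr K i + pvG arr K (K - i) = pvT arr K i := by
  intro i h1 h2
  have hi0 : i ≠ 0 := by omega
  have hiK : i * 2 ≠ K := by omega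
  have hlt : i < K - i := by omega
  have hnlt : ¬ (K - i < i) := by omega
  have hKi0 : K - i ≠ 0 := by omega
  have hKiK : (K - i) * 2 ≠ K := by omega
  have hKKi : K - (K - i) = i := by ring
  by_cases hi : i ∈ pvRems arr K
  · by_cases hki : (K - i) ∈ pvRems arr K
    · simp [pvG, pvT, hi, hki, hi0, hiK, hKi0, hKiK, hKKi, hlt, hnlt]
    · simp [pvG, pvT, hi, hki, hi0, hiK,
        pv_count_zero arr hki, max_eq_left (pv_count_nonneg arr K i)]
  · by_cases hki : (K - i) ∈ pvRems arr K
    · simp [pvG, pvT, hi, hki, hKi0, hKiK, hKKi, hiK,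
        pv_count_zero arr hi, max_eq_right (pv_count_nonneg arr K (K - i))]
    · simp [pvG, pvT, hi, hki, hiK,
        pv_count_zero arr hi, pv_count_zero arr hki]

lemma pv_set_to_range (arr : List Int) (K : Int) (hK : 0 < K) :
    ((PySem.Set.ofList (pvRems arr K)).map (pvG arr K)).sum
      = ((PySem.List.pyRange 0 K 1).map (pvG arr K)).sum := by
  rw [← List.sum_toFinset _ (PySem.Set.nodup_ofList (pvRems arr K)),
      ← List.sum_toFinset _ (PySem.List.nodup_pyRange_one 0 K)]
  apply Finset.sum_subset
  · intro x hx
    have hxm : x ∈ pvRems arr K := (PySem.Set.mem_ofList _ _).1 (List.mem_toFinset.1 hx)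
    obtain ⟨h0, h1⟩ := pv_mem_rems hK hxm
    exact List.mem_toFinset.2 (PySem.List.mem_pyRange_one.2 ⟨h0, h1⟩)
  · intro x _ hx
    have hxm : x ∉ pvRems arr K := by
      intro h
      exact hx (List.mem_toFinset.2 ((PySem.Set.mem_ofList _ _).2 h))
    simp [pvG, hxm]

-- ---- B-side: run-length encoding of the sorted remainder list ----

def pvRleFrom (v c : Int) : List Int → List (Int × Int)
  | [] => [(v, c)]
  | r :: t => if v = r then pvRleFrom v (c + 1) t else (v, c) :: pvRleFrom r 1 t

lemma pv_foldl_rle (l : List Int) : ∀ (gs : List (Int × Int)) (v c : Int),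
    l.foldl (fun gs r =>
      match gs.getLast? with
      | some (v, c) => if v == r then gs.dropLast ++ [(v, c + 1)] else gs ++ [(r, 1)]
      | none => [(r, 1)]) (gs ++ [(v, c)])
    = gs ++ pvRleFrom v c l := by
  induction l with
  | nil => intro gs v c; simp [pvRleFrom]
  | cons x t ih =>
    intro gs v c
    simp only [List.foldl_cons, List.getLast?_concat, List.dropLast_concat]
    by_cases hvx : v = x
    · rw [if_pos (by simpa using hvx), ih gs v (c + 1), pvRleFrom, if_pos hvx]
    · rw [if_neg (by simpa using hvx), List.append_assoc gs [(v, c)] [(x, 1)]]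
      rw [show ([(v, c)] ++ [(x, 1)] : List (Int × Int)) = (v, c) :: [(x, 1)] from rfl]
      rw [show gs ++ ((v, c) :: [(x, 1)]) = (gs ++ [(v, c)]) ++ [(x, 1)] from by simp]
      rw [ih (gs ++ [(v, c)]) x 1, pvRleFrom, if_neg hvx]
      simp

lemma pv_rleFrom_head (l : List Int) : ∀ v c : Int,
    ∃ c' t', pvRleFrom v c l = (v, c') :: t' := by
  induction l with
  | nil => intro v c; exact ⟨c, [], rfl⟩
  | cons x t ih =>
    intro v c
    by_cases hvx : v = x
    · rw [pvRleFrom, if_pos hvx]; exact ih v (c + 1)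
    · rw [pvRleFrom, if_neg hvx]; exact ⟨c, _, rfl⟩

lemma pv_rleFrom_mem (l : List Int) : ∀ v c w : Int,
    (w ∈ (pvRleFrom v c l).map Prod.fst ↔ w = v ∨ w ∈ l) := by
  induction l with
  | nil => intro v c w; simp [pvRleFrom, eq_comm]
  | cons x t ih =>
    intro v c w
    by_cases hvx : v = x
    · subst hvx
      rw [pvRleFrom, if_pos rfl, ih]
      constructor
      · rintro (h | h)
        · exact Or.inl h
        · exact Or.inr (List.mem_cons_of_mem _ h)
      · rintro (h | h)
        · exact Or.inl h
        · rcases List.mem_cons.1 h with h | h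
          · exact Or.inl h
          · exact Or.inr h
    · rw [pvRleFrom, if_neg hvx]
      simp only [List.map_cons, List.mem_cons, ih x 1 w]

lemma pv_rleFrom_sorted (l : List Int) : ∀ v c : Int, (v :: l).Pairwise (· ≤ ·) →
    ((pvRleFrom v c l).map Prod.fst).Pairwise (· < ·) := by
  induction l with
  | nil => intro v c _; simp [pvRleFrom]
  | cons x t ih =>
    intro v c hs
    have hvx : v ≤ x := (List.pairwise_cons.1 hs).1 x (List.mem_cons_self ..)
    have hxt : (x :: t).Pairwise (· ≤ ·) := (List.pairwise_cons.1 hs).2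
    by_cases h : v = x
    · rw [pvRleFrom, if_pos h]
      exact ih v (c + 1) (by subst h; exact hs.of_cons)
    · rw [pvRleFrom, if_neg h]
      rw [List.map_cons, List.pairwise_cons]
      refine ⟨?_, ih x 1 hxt⟩
      intro w hw
      rcases (pv_rleFrom_mem t x 1 w).1 hw with rfl | hwt
      · omega
      · have : x ≤ w := (List.pairwise_cons.1 hxt).1 w hwt
        omega

lemma pv_rleFrom_count (l : List Int) : ∀ v c : Int, (v :: l).Pairwise (· ≤ ·) →
    ∀ p ∈ pvRleFrom v c l,
      (p.1 = v ∧ p.2 = c + (l.count v : Int)) ∨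
      (p.1 ≠ v ∧ p.1 ∈ l ∧ p.2 = (l.count p.1 : Int)) := by
  induction l with
  | nil =>
    intro v c _ p hp
    simp only [pvRleFrom, List.mem_singleton] at hp
    subst hp
    simp
  | cons x t ih =>
    intro v c hs p hp
    have hvx : v ≤ x := (List.pairwise_cons.1 hs).1 x (List.mem_cons_self ..)
    have hxt : (x :: t).Pairwise (· ≤ ·) := (List.pairwise_cons.1 hs).2
    by_cases h : v = x
    · subst h
      rw [pvRleFrom, if_pos rfl] at hp
      rcases ih v (c + 1) hs.of_cons p hp with ⟨h1, h2⟩ | ⟨h1, h2, h3⟩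
      · left
        refine ⟨h1, ?_⟩
        rw [h2, List.count_cons_self]
        push_cast
        ring
      · right
        refine ⟨h1, List.mem_cons_of_mem _ h2, ?_⟩
        have hcc : List.count p.1 (v :: t) = List.count p.1 t := by
          simp [Ne.symm h1]
        rw [h3, hcc]
    · rw [pvRleFrom, if_neg h] at hp
      have hvnot : v ∉ x :: t := by
        intro hmem
        rcases List.mem_cons.1 hmem with rfl | hvt
        · exact h rfl
        · have hx : x ≤ v := (List.pairwise_cons.1 hxt).1 v hvt
          exact h (le_antisymm hvx hx)
      rcases List.mem_cons.1 hp with rfl | hp'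
      · left
        simp [List.count_eq_zero.2 hvnot]
      · right
        rcases ih x 1 hxt p hp' with ⟨h1, h2⟩ | ⟨h1, h2, h3⟩
        · refine ⟨?_, by simp [h1], ?_⟩
          · rw [h1]; exact fun hc => h hc.symm
          · rw [h2, h1, List.count_cons_self]
            push_cast
            ring
        · have hpt : p.1 ∈ t := h2
          have hxp : x ≤ p.1 := (List.pairwise_cons.1 hxt).1 p.1 hpt
          refine ⟨by omega, List.mem_cons_of_mem _ h2, ?_⟩
          have hcc : List.count p.1 (x :: t) = List.count p.1 t := by
            simp [Ne.symm h1]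
          rw [h3, hcc]

-- ---- B-side: the index segment groups[i..j] and the two-pointer invariant ----

def pvSeg (gs : List (Int × Int)) (i j : Int) : List (Int × Int) :=
  (gs.drop i.toNat).take (j + 1 - i).toNat

lemma pvSeg_sublist (gs : List (Int × Int)) (i j : Int) : (pvSeg gs i j).Sublist gs :=
  (List.take_sublist _ _).trans (List.drop_sublist _ _)

lemma pvSeg_empty (gs : List (Int × Int)) {i j : Int} (h : j < i) : pvSeg gs i j = [] := by
  unfold pvSeg
  rw [show (j + 1 - i).toNat = 0 from by omega, List.take_zero]

lemma pvSeg_cons (gs : List (Int × Int)) {i j : Int} (h0 : 0 ≤ i) (hij : i ≤ j)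
    (hj : j < (gs.length : Int)) :
    pvSeg gs i j = gs[i.toNat]'(by omega) :: pvSeg gs (i + 1) j := by
  unfold pvSeg
  rw [List.drop_eq_getElem_cons (by omega : i.toNat < gs.length)]
  rw [show (j + 1 - i).toNat = (j + 1 - (i + 1)).toNat + 1 from by omega]
  rw [List.take_succ_cons]
  rw [show (i + 1).toNat = i.toNat + 1 from by omega]

lemma pvSeg_concat (gs : List (Int × Int)) {i j : Int} (h0 : 0 ≤ i) (hij : i ≤ j)
    (hj : j < (gs.length : Int)) :
    pvSeg gs i j = pvSeg gs i (j - 1) ++ [gs[j.toNat]'(by omega)] := by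
  unfold pvSeg
  rw [show (j + 1 - i).toNat = (j - 1 + 1 - i).toNat + 1 from by omega]
  rw [List.take_add_one]
  congr 1
  have hget : (gs.drop i.toNat)[(j - 1 + 1 - i).toNat]? = some (gs[j.toNat]'(by omega)) := by
    rw [List.getElem?_drop]
    rw [show i.toNat + (j - 1 + 1 - i).toNat = j.toNat from by omega]
    exact List.getElem?_eq_getElem (by omega)
  rw [hget]
  rfl

lemma pv_pyGetPair (gs : List (Int × Int)) (i : Int) (h0 : 0 ≤ i) (hl : i < (gs.length : Int)) :
    (PySem.List.pyGet? gs i).getD (0, 0) = gs[i.toNat]'(by omega) := by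
  rw [PySem.List.pyGet?_eq_some_getElem gs h0 hl]
  rfl

lemma pv_twoPtr_sum (arr : List Int) (K : Int) (gs : List (Int × Int))
    (hsort : gs.Pairwise (fun a b => a.1 < b.1)) :
    ∀ fuel : Nat, ∀ i j total : Int, 0 ≤ i → j < (gs.length : Int) → (j + 1 - i).toNat ≤ fuel →
    (∀ p ∈ pvSeg gs i j, p.1 ∈ pvRems arr K ∧ 0 < p.1 ∧ p.1 < K ∧ p.2 = pvC arr K p.1) →
    (∀ p ∈ pvSeg gs i j, (K - p.1) ∈ pvRems arr K → (K - p.1) ∈ (pvSeg gs i j).map Prod.fst) →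
    pvTwoPtr gs K i j total = total + ((pvSeg gs i j).map (fun p => pvG arr K p.1)).sum := by
  intro fuel
  induction fuel with
  | zero =>
    intro i j total h0 hj hfuel _ _
    have hij : ¬ i ≤ j := by omega
    rw [pvTwoPtr, dif_neg hij, pvSeg_empty gs (by omega)]
    simp
  | succ fuel ih =>
    intro i j total h0 hj hfuel hprops hclose
    by_cases hij : i ≤ j
    · have hj0 : 0 ≤ j := by omega
      have hil : i < (gs.length : Int) := by omega
      rw [pvTwoPtr, dif_pos hij]
      simp only [pv_pyGetPair gs i h0 hil, pv_pyGetPair gs j hj0 hj]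
      set pi := gs[i.toNat]'(by omega) with hpi
      set pj := gs[j.toNat]'(by omega) with hpj
      by_cases heq : i = j
      · subst heq
        rw [dif_pos rfl]
        have hseg : pvSeg gs i i = [pi] := by
          rw [pvSeg_cons gs h0 le_rfl hj, pvSeg_empty gs (by omega)]
        rw [hseg]
        obtain ⟨hmem, hpos, hlt, hcnt⟩ := hprops pi (by rw [hseg]; exact List.mem_singleton.2 rfl)
        have hcl := hclose pi (by rw [hseg]; exact List.mem_singleton.2 rfl)
        rw [hseg] at hcl
        simp only [List.map_cons, List.map_nil, List.sum_cons, List.sum_nil, add_zero]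
        by_cases hmid : pi.1 * 2 = K
        · rw [if_pos hmid, pvG, if_pos hmem, if_pos (Or.inr hmid)]
        · rw [if_neg hmid]
          have hk : (K - pi.1) ∉ pvRems arr K := by
            intro hk
            have := hcl hk
            simp only [List.map_cons, List.map_nil, List.mem_singleton] at this
            omega
          rw [pvG, if_pos hmem, if_neg (by omega), if_pos hk, hcnt]
      · rw [dif_neg heq]
        have hij' : i < j := by omega
        -- decompositions of the segment
        have hsegc : pvSeg gs i j = pi :: pvSeg gs (i + 1) j := pvSeg_cons gs h0 hij hj
        have hsega : pvSeg gs i j = pvSeg gs i (j - 1) ++ [pj] := pvSeg_concat gs h0 hij hj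
        have hsegm : pvSeg gs (i + 1) j = pvSeg gs (i + 1) (j - 1) ++ [pj] :=
          pvSeg_concat gs (by omega) (by omega) hj
        have hps : (pvSeg gs i j).Pairwise (fun a b => a.1 < b.1) :=
          hsort.sublist (pvSeg_sublist gs i j)
        have hpicons := List.pairwise_cons.1 (hsegc ▸ hps)
        have hlt_pi : ∀ p ∈ pvSeg gs (i + 1) j, pi.1 < p.1 := hpicons.1
        have hlt_pj : ∀ p ∈ pvSeg gs i (j - 1), p.1 < pj.1 := by
          have := hsega ▸ hps
          intro p hp
          exact (List.pairwise_append.1 this).2.2 p hp pj (List.mem_singleton.2 rfl)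
        have hpj_mem : pj ∈ pvSeg gs i j := by
          rw [hsega]; exact List.mem_append_right _ (List.mem_singleton.2 rfl)
        have hpi_mem : pi ∈ pvSeg gs i j := by
          rw [hsegc]; exact List.mem_cons_self ..
        obtain ⟨hpi_r, hpi_pos, hpi_lt, hpi_cnt⟩ := hprops pi hpi_mem
        obtain ⟨hpj_r, hpj_pos, hpj_lt, hpj_cnt⟩ := hprops pj hpj_mem
        have hpilt : pi.1 < pj.1 := by
          have := hpicons.1 pj
          apply this
          rw [hsegm]
          exact List.mem_append_right _ (List.mem_singleton.2 rfl)
        -- bound on all segment values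
        have hub : ∀ p ∈ pvSeg gs i j, p.1 ≤ pj.1 := by
          intro p hp
          rw [hsega] at hp
          rcases List.mem_append.1 hp with h | h
          · exact le_of_lt (hlt_pj p h)
          · rw [List.mem_singleton.1 h]
        have hlb : ∀ p ∈ pvSeg gs i j, pi.1 ≤ p.1 := by
          intro p hp
          rw [hsegc] at hp
          rcases List.mem_cons.1 hp with rfl | h
          · exact le_rfl
          · exact le_of_lt (hlt_pi p h)
        by_cases hsum : pi.1 + pj.1 = K
        · rw [if_pos hsum]
          -- both endpoint groups consumed
          have hmid_sub : ∀ p ∈ pvSeg gs (i + 1) (j - 1), p ∈ pvSeg gs i j := by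
            intro p hp
            rw [hsegc, hsegm]
            exact List.mem_cons_of_mem _ (List.mem_append_left _ hp)
          have hmid_lt : ∀ p ∈ pvSeg gs (i + 1) (j - 1), pi.1 < p.1 ∧ p.1 < pj.1 := by
            intro p hp
            refine ⟨hlt_pi p (by rw [hsegm]; exact List.mem_append_left _ hp), ?_⟩
            have : (pvSeg gs (i + 1) j).Pairwise (fun a b => a.1 < b.1) :=
              hsort.sublist (pvSeg_sublist gs (i + 1) j)
            rw [hsegm] at this
            exact (List.pairwise_append.1 this).2.2 p hp pj (List.mem_singleton.2 rfl)
          have hcl' : ∀ p ∈ pvSeg gs (i + 1) (j - 1), (K - p.1) ∈ pvRems arr K →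
              (K - p.1) ∈ (pvSeg gs (i + 1) (j - 1)).map Prod.fst := by
            intro p hp hkr
            have := hclose p (hmid_sub p hp) hkr
            rcases List.mem_map.1 this with ⟨q, hq, hqe⟩
            rw [hsegc, hsegm] at hq
            obtain ⟨hplt1, hplt2⟩ := hmid_lt p hp
            rcases List.mem_cons.1 hq with hq1 | hq'
            · rw [hq1] at hqe
              omega
            · rcases List.mem_append.1 hq' with hq2 | hq2
              · exact List.mem_map.2 ⟨q, hq2, hqe⟩
              · rw [List.mem_singleton.1 hq2] at hqe
                omega
          have hrec := ih (i + 1) (j - 1) (total + max pi.2 pj.2) (by omega) (by omega)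
            (by omega)
            (fun p hp => hprops p (hmid_sub p hp)) hcl'
          rw [hrec]
          -- sum over segment = pvG pi.1 + mid + pvG pj.1
          have hGpi : pvG arr K pi.1 = max pi.2 pj.2 := by
            rw [pvG, if_pos hpi_r, if_neg (by omega), if_neg (by rw [show K - pi.1 = pj.1 from by omega]; simp [hpj_r]),
              if_pos (by omega)]
            rw [show K - pi.1 = pj.1 from by omega, hpi_cnt, hpj_cnt]
          have hGpj : pvG arr K pj.1 = 0 := by
            rw [pvG, if_pos hpj_r, if_neg (by omega), if_neg (by rw [show K - pj.1 = pi.1 from by omega]; simp [hpi_r]),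
              if_neg (by omega)]
          rw [hsegc, hsegm]
          simp only [List.map_cons, List.map_append, List.map_nil, List.sum_cons,
            List.sum_append, List.sum_nil]
          rw [hGpi, hGpj]
          ring
        · by_cases hslt : pi.1 + pj.1 < K
          · rw [if_neg hsum, if_pos hslt]
            have hsub : ∀ p ∈ pvSeg gs (i + 1) j, p ∈ pvSeg gs i j := by
              intro p hp; rw [hsegc]; exact List.mem_cons_of_mem _ hp
            have hKpi : (K - pi.1) ∉ pvRems arr K := by
              intro hk
              have := hclose pi hpi_mem hk
              rcases List.mem_map.1 this with ⟨q, hq, hqe⟩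
              have := hub q hq
              omega
            have hcl' : ∀ p ∈ pvSeg gs (i + 1) j, (K - p.1) ∈ pvRems arr K →
                (K - p.1) ∈ (pvSeg gs (i + 1) j).map Prod.fst := by
              intro p hp hkr
              have := hclose p (hsub p hp) hkr
              rcases List.mem_map.1 this with ⟨q, hq, hqe⟩
              rw [hsegc] at hq
              obtain ⟨hpr, hppos, hplt, hpcnt⟩ := hprops p (hsub p hp)
              rcases List.mem_cons.1 hq with hq1 | hq'
              · exfalso
                rw [hq1] at hqe
                rw [show p.1 = K - pi.1 from by omega] at hpr
                exact hKpi hpr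
              · exact List.mem_map.2 ⟨q, hq', hqe⟩
            have hrec := ih (i + 1) j (total + pi.2) (by omega) hj (by omega)
              (fun p hp => hprops p (hsub p hp)) hcl'
            rw [hrec]
            have hGpi : pvG arr K pi.1 = pi.2 := by
              rw [pvG, if_pos hpi_r, if_neg (by omega), if_pos hKpi, hpi_cnt]
            rw [hsegc]
            simp only [List.map_cons, List.sum_cons]
            rw [hGpi]
            ring
          · rw [if_neg hsum, if_neg hslt]
            have hsgt : K < pi.1 + pj.1 := by omega
            have hsub : ∀ p ∈ pvSeg gs i (j - 1), p ∈ pvSeg gs i j := by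
              intro p hp; rw [hsega]; exact List.mem_append_left _ hp
            have hKpj : (K - pj.1) ∉ pvRems arr K := by
              intro hk
              have := hclose pj hpj_mem hk
              rcases List.mem_map.1 this with ⟨q, hq, hqe⟩
              have := hlb q hq
              omega
            have hcl' : ∀ p ∈ pvSeg gs i (j - 1), (K - p.1) ∈ pvRems arr K →
                (K - p.1) ∈ (pvSeg gs i (j - 1)).map Prod.fst := by
              intro p hp hkr
              have := hclose p (hsub p hp) hkr
              rcases List.mem_map.1 this with ⟨q, hq, hqe⟩
              rw [hsega] at hq
              obtain ⟨hpr, hppos, hplt, hpcnt⟩ := hprops p (hsub p hp)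
              rcases List.mem_append.1 hq with hq' | hq'
              · exact List.mem_map.2 ⟨q, hq', hqe⟩
              · exfalso
                rw [List.mem_singleton.1 hq'] at hqe
                rw [show p.1 = K - pj.1 from by omega] at hpr
                exact hKpj hpr
            have hrec := ih i (j - 1) (total + pj.2) h0 (by omega) (by omega)
              (fun p hp => hprops p (hsub p hp)) hcl'
            rw [hrec]
            have hGpj : pvG arr K pj.1 = pj.2 := by
              rw [pvG, if_pos hpj_r, if_neg (by omega), if_pos hKpj, hpj_cnt]
            rw [hsega]
            simp only [List.map_append, List.map_cons, List.map_nil, List.sum_append,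
              List.sum_cons, List.sum_nil]
            rw [hGpj]
            ring
    · rw [pvTwoPtr, dif_neg hij, pvSeg_empty gs (by omega)]
      simp

lemma pv_fst_bound (G : List (Int × Int)) (m : Int) (ms : List Int)
    (hfst : G.map Prod.fst = m :: ms) (hsortG : (G.map Prod.fst).Pairwise (· < ·)) :
    ∀ p ∈ G, m ≤ p.1 := by
  intro p hp
  have hmem : p.1 ∈ m :: ms := hfst ▸ List.mem_map_of_mem hp
  rcases List.mem_cons.1 hmem with h | h
  · omega
  · have := (List.pairwise_cons.1 (hfst ▸ hsortG)).1 p.1 h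
    omega

lemma pv_B_sum (arr : List Int) (N K : Int) (hK : 2 ≤ K) :
    maxGroupSize_alt arr N K
      = ((PySem.Set.ofList (pvRems arr K)).map (pvG arr K)).sum := by
  have hKpos : (0:Int) < K := by omega
  simp only [maxGroupSize_alt]
  rcases hs : PySem.List.sorted (arr.map (fun e => PySem.Int.mod e K)) (fun x => x) false
    with _ | ⟨m, t⟩
  · -- sorted list empty: arr has no remainders at all
    have hrems : pvRems arr K = [] := by
      have hp := PySem.List.sorted_perm (pvRems arr K) (fun x => x) false
      rw [show PySem.List.sorted (pvRems arr K) (fun x => x) false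
          = PySem.List.sorted (arr.map (fun e => PySem.Int.mod e K)) (fun x => x) false from rfl,
        hs] at hp
      exact hp.symm.eq_nil
    rw [hrems]
    show pvTwoPtr [] K 0 (((([] : List (Int × Int))).length : Int) - 1) 0
        = ((PySem.Set.ofList ([] : List Int)).map (pvG arr K)).sum
    rw [show ((PySem.Set.ofList ([] : List Int)).map (pvG arr K)).sum = 0 from rfl]
    rw [pvTwoPtr]
    norm_num
  · -- sorted list m :: t
    have hsorted : (m :: t).Pairwise (fun a b => a ≤ b) := by
      have := PySem.List.sorted_pairwise (arr.map (fun e => PySem.Int.mod e K)) (fun x => x)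
      rwa [hs] at this
    have hperm : (m :: t).Perm (pvRems arr K) := by
      have hp := PySem.List.sorted_perm (pvRems arr K) (fun x => x) false
      rw [show PySem.List.sorted (pvRems arr K) (fun x => x) false
          = PySem.List.sorted (arr.map (fun e => PySem.Int.mod e K)) (fun x => x) false from rfl,
        hs] at hp
      exact hp
    have hmem_srt : ∀ w : Int, w ∈ m :: t ↔ w ∈ pvRems arr K := fun w => hperm.mem_iff
    have hgroups : List.foldl (fun gs r =>
        match gs.getLast? with
        | some (v, c) => if v == r then gs.dropLast ++ [(v, c + 1)] else gs ++ [(r, 1)]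
        | none => [(r, 1)]) ([] : List (Int × Int)) (m :: t) = pvRleFrom m 1 t := by
      rw [List.foldl_cons]
      have h0 : (match ([] : List (Int × Int)).getLast? with
        | some (v, c) => if v == m then ([] : List (Int × Int)).dropLast ++ [(v, c + 1)]
            else ([] : List (Int × Int)) ++ [(m, 1)]
        | none => [(m, (1:Int))]) = ([] : List (Int × Int)) ++ [(m, 1)] := rfl
      rw [h0, pv_foldl_rle t [] m 1]
      rfl
    rw [hgroups]
    -- facts about the group list
    obtain ⟨c', t', hG⟩ := pv_rleFrom_head t m 1
    have hmemG := pv_rleFrom_mem t m 1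
    have hsortG : ((pvRleFrom m 1 t).map Prod.fst).Pairwise (· < ·) :=
      pv_rleFrom_sorted t m 1 hsorted
    have hcountG := pv_rleFrom_count t m 1 hsorted
    have hPairs : (pvRleFrom m 1 t).Pairwise (fun a b => a.1 < b.1) :=
      List.pairwise_map.1 hsortG
    have hnodupG : ((pvRleFrom m 1 t).map Prod.fst).Nodup := hsortG.imp (fun h => ne_of_lt h)
    have hmem_rems : ∀ w : Int, w ∈ (pvRleFrom m 1 t).map Prod.fst ↔ w ∈ pvRems arr K := by
      intro w
      rw [hmemG w, ← List.mem_cons, hmem_srt w]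
    have hm_rems : m ∈ pvRems arr K := (hmem_srt m).1 (List.mem_cons_self ..)
    have hm0 : 0 ≤ m := (pv_mem_rems hKpos hm_rems).1
    have hcnt : ∀ p ∈ pvRleFrom m 1 t, p.2 = pvC arr K p.1 := by
      intro p hp
      have hcC : pvC arr K p.1 = (List.count p.1 (m :: t) : Int) := by
        unfold pvC
        rw [hperm.count_eq]
      rcases hcountG p hp with ⟨h1, h2⟩ | ⟨h1, h2, h3⟩
      · rw [h2, hcC, h1, List.count_cons_self]
        push_cast
        ring
      · have hcc : List.count p.1 (m :: t) = List.count p.1 t := by simp [Ne.symm h1]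
        rw [h3, hcC, hcc]
    have hprops : ∀ p ∈ pvRleFrom m 1 t,
        p.1 ∈ pvRems arr K ∧ p.1 < K ∧ p.2 = pvC arr K p.1 := by
      intro p hp
      have hr : p.1 ∈ pvRems arr K := (hmem_rems p.1).1 (List.mem_map_of_mem hp)
      exact ⟨hr, (pv_mem_rems hKpos hr).2, hcnt p hp⟩
    have hfstG : (pvRleFrom m 1 t).map Prod.fst = m :: t'.map Prod.fst := by
      rw [hG, List.map_cons]
    -- the common distinct-value sum
    have hsum_set : ((PySem.Set.ofList (pvRems arr K)).map (pvG arr K)).sum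
        = (((pvRleFrom m 1 t).map Prod.fst).map (pvG arr K)).sum := by
      rw [← List.sum_toFinset _ (PySem.Set.nodup_ofList (pvRems arr K)),
        ← List.sum_toFinset _ hnodupG]
      congr 1
      apply Finset.ext
      intro x
      simp only [List.mem_toFinset, PySem.Set.mem_ofList, hmem_rems x]
    have hmapmap : ∀ l : List (Int × Int),
        (l.map Prod.fst).map (pvG arr K) = l.map (fun p => pvG arr K p.1) := by
      intro l
      rw [List.map_map]
      rfl
    rw [hG]
    show (if m = 0 then pvTwoPtr ((m, c') :: t') K 1 ((((m, c') :: t').length : Int) - 1) 1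
        else pvTwoPtr ((m, c') :: t') K 0 ((((m, c') :: t').length : Int) - 1) 0)
      = ((PySem.Set.ofList (pvRems arr K)).map (pvG arr K)).sum
    have hlen : (((m, c') :: t').length : Int) - 1 = (t'.length : Int) := by
      simp
    rw [hlen]
    by_cases hm : m = 0
    · rw [if_pos hm]
      have hseg1 : pvSeg ((m, c') :: t') 1 (t'.length : Int) = t' := by
        unfold pvSeg
        rw [show ((1:Int)).toNat = 1 from rfl,
          show ((t'.length : Int) + 1 - 1).toNat = t'.length from by omega]
        simp
      have htp := pv_twoPtr_sum arr K ((m, c') :: t') (hG ▸ hPairs) (t'.length + 1)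
        1 (t'.length : Int) 1 (by omega)
        (by rw [List.length_cons]; push_cast; omega) (by omega)
        (by
          rw [hseg1]
          intro p hp
          have hpG : p ∈ pvRleFrom m 1 t := by rw [hG]; exact List.mem_cons_of_mem _ hp
          obtain ⟨hr, hlt, hc⟩ := hprops p hpG
          have hgt : m < p.1 := by
            have := (List.pairwise_cons.1 (hfstG ▸ hsortG)).1 p.1 (List.mem_map_of_mem hp)
            omega
          exact ⟨hr, by omega, hlt, hc⟩)
        (by
          rw [hseg1]
          intro p hp hkr
          have hpG : p ∈ pvRleFrom m 1 t := by rw [hG]; exact List.mem_cons_of_mem _ hp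
          obtain ⟨hr, hlt, _⟩ := hprops p hpG
          have hkmem : (K - p.1) ∈ (pvRleFrom m 1 t).map Prod.fst := (hmem_rems _).2 hkr
          rw [hfstG] at hkmem
          rcases List.mem_cons.1 hkmem with h | h
          · exfalso
            have h0lt : 0 < p.1 := by
              have := (List.pairwise_cons.1 (hfstG ▸ hsortG)).1 p.1 (List.mem_map_of_mem hp)
              omega
            omega
          · exact h)
      rw [htp, hseg1]
      rw [hsum_set, hfstG, List.map_cons, List.sum_cons]
      have hg0 : pvG arr K m = 1 := by
        rw [pvG, if_pos hm_rems, if_pos (Or.inl hm)]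
      rw [hg0, hmapmap t']
    · rw [if_neg hm]
      have hseg0 : pvSeg ((m, c') :: t') 0 (t'.length : Int) = (m, c') :: t' := by
        unfold pvSeg
        rw [show ((0:Int)).toNat = 0 from rfl,
          show ((t'.length : Int) + 1 - 0).toNat = t'.length + 1 from by omega]
        simp
      have hmlb : ∀ p ∈ ((m, c') :: t' : List (Int × Int)), m ≤ p.1 := by
        intro p hp
        exact pv_fst_bound (pvRleFrom m 1 t) m (t'.map Prod.fst) hfstG hsortG p (hG ▸ hp)
      have htp := pv_twoPtr_sum arr K ((m, c') :: t') (hG ▸ hPairs) (t'.length + 1)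
        0 (t'.length : Int) 0 (by omega)
        (by rw [List.length_cons]; push_cast; omega) (by omega)
        (by
          rw [hseg0]
          intro p hp
          have hpG : p ∈ pvRleFrom m 1 t := hG ▸ hp
          obtain ⟨hr, hlt, hc⟩ := hprops p hpG
          have := hmlb p hp
          exact ⟨hr, by omega, hlt, hc⟩)
        (by
          rw [hseg0]
          intro p hp hkr
          have hkmem : (K - p.1) ∈ (pvRleFrom m 1 t).map Prod.fst := (hmem_rems _).2 hkr
          rw [hG] at hkmem
          exact hkmem)
      rw [htp, hseg0]
      rw [hsum_set, hfstG]
      simp [List.map_cons, List.sum_cons, List.map_map, Function.comp_def]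

-- ===== VERDICT (by name: the statement is the Claim_ definition above) =====
theorem maxGroupSize_spec : Claim_equal_maxGroupSize := by
  intro arr N K _ hK
  have hK2 : (2:Int) ≤ K := hK
  have hKpos : (0:Int) < K := by omega
  show maxGroupSize arr N K = maxGroupSize_alt arr N K
  rw [pv_A_sum arr N K hK2, pv_B_sum arr N K hK2, pv_set_to_range arr K hKpos]
  have h0 : PySem.List.pyRange 0 K 1 = 0 :: PySem.List.pyRange 1 K 1 := by
    simpa using PySem.List.pyRange_one_cons (a := 0) (b := K) hKpos
  rw [h0]
  have hcore := pv_pair_sum K (pvG arr K) (pvT arr K) hK2 (pv_mid arr K hK2) (pv_pair arr K hK2)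
      (K - 1).toNat 1 (by omega) (by omega)
  have hK1 : K - 1 + 1 = K := by ring
  rw [hK1] at hcore
  have hg0 : pvG arr K 0 = (if 0 < pvC arr K 0 then 1 else 0) := by
    unfold pvG pvC
    by_cases h : (0:Int) ∈ pvRems arr K
    · simp [h, List.count_pos_iff.2 h]
    · simp [h, List.count_eq_zero.2 h]
  simp only [List.map_cons, List.sum_cons, hcore, hg0]
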